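-- pv_equiv track=rewrite | github.com/ElijahHW/BloomFilter | bloomFilter.py | hashFour
-- ===== SOURCE A (Python) =====
-- Prime = pow(2,24)-3 # prime
--
-- def hashFour(listValues) -> int: ## h4() - GROUPED SUMS OF FIVE
--     valuesList = listValues.copy()
--     subRes = []
--     result = 1
--     i = 0
--     N = 5
--     length = len(valuesList)
--     while(length % N) != 0:
--         valuesList.insert(len(valuesList), 32)
--         length += 1
--     if(length % N) == 0:
--         subList = [valuesList[n:n+N] for n in range(0, len(valuesList), N)]
--         for x in subList:
--             subRes.append(sum(subList[i]))
--             i+=1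
--         for x in subRes:
--             result = result * x
--             result = result % Prime
--         return result
-- ===== SOURCE B (Python) =====
-- Prime = pow(2, 24) - 3  # prime
--
-- def hashFour(listValues) -> int:  ## h4() - GROUPED SUMS OF FIVE
--     result = 1
--     acc = 0
--     count = 0
--     for v in listValues:
--         acc += v
--         count += 1
--         if count == 5:
--             result = result * acc % Prime
--             acc = 0
--             count = 0
--     if count:
--         result = result * (acc + 32 * (5 - count)) % Prime
--     return result
-- ===== Notes on version B (the rewrite author's own statement) =====
-- stated objective: simpler
-- what changed: Single streaming pass with a running group accumulator and modular product, replacing A's copy-and-pad loop, materialized list-of-slices, index-driven sum list and separate product loop.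
import Mathlib
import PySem

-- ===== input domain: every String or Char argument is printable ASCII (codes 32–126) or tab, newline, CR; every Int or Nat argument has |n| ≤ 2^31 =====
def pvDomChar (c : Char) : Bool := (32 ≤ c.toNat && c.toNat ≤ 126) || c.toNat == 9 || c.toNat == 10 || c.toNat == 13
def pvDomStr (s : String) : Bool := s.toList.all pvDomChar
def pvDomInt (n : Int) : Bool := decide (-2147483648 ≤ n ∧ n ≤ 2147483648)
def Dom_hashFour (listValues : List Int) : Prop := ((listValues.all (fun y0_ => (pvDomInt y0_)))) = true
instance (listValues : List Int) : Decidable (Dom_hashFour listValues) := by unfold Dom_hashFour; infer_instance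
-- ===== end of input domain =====

-- B is a single streaming pass (running group accumulator + running modular product) instead of
-- A's pad-copy loop, list-of-slices, indexed sum list and separate product loop; return values agree.

-- ===== PORT A =====
-- the `while (length % N) != 0: valuesList.insert(len(valuesList), 32); length += 1` loop
def hashFourPad (valuesList : List Int) (length : Nat) : List Int :=
  if length % 5 ≠ 0 then hashFourPad (valuesList ++ [32]) (length + 1) else valuesList
termination_by (5 - length % 5) % 5
decreasing_by omega

def hashFour (listValues : List Int) : Int :=
  let valuesList := hashFourPad listValues listValues.length   -- listValues.copy() then the pad loop
  if valuesList.length % 5 = 0 then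
    let subList := (PySem.List.pyRange 0 (valuesList.length : Int) 5).map
      (fun n => PySem.List.slice valuesList (some n) (some (n + 5)))
    -- for x in subList: subRes.append(sum(subList[i])); i += 1
    let st := subList.foldl
      (fun (st : List Int × Int) _x =>
        (st.1 ++ [(PySem.List.pyGetD subList st.2 []).sum], st.2 + 1)) ([], 0)
    let subRes := st.1
    subRes.foldl (fun result x => PySem.Int.mod (result * x) 16777213) 1
  else 0  -- unreachable: the pad loop ensures length % 5 = 0 (Python would fall off and return None)

-- ===== PORT B =====
def bStep (s : Int × Int × Int) (v : Int) : Int × Int × Int :=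
  let result := s.1
  let acc := s.2.1 + v
  let count := s.2.2 + 1
  if count = 5 then (PySem.Int.mod (result * acc) 16777213, 0, 0) else (result, acc, count)

def hashFour_alt (listValues : List Int) : Int :=
  let s := listValues.foldl bStep (1, 0, 0)
  if s.2.2 ≠ 0 then PySem.Int.mod (s.1 * (s.2.1 + 32 * (5 - s.2.2))) 16777213 else s.1

-- ===== PRECONDITION & SPEC =====
def Spec_hashFour (listValues : List Int) (out : Int) : Prop := out = hashFour_alt listValues
instance (listValues : List Int) (out : Int) : Decidable (Spec_hashFour listValues out) := by unfold Spec_hashFour; infer_instance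

-- ===== CLAIM (what is proved, stated in full; the proofs are below) =====
def Claim_equal_hashFour : Prop := ∀ (listValues : List Int), Dom_hashFour listValues → Spec_hashFour listValues (hashFour listValues)

-- ===== LEMMAS AND PROOFS =====

-- common reference function: peel groups of five, fold the last (padded) partial group
def G : List Int → Int → Int
  | [], r => r
  | x :: t, r =>
    if 5 ≤ (x :: t).length then G ((x :: t).drop 5) (PySem.Int.mod (r * ((x :: t).take 5).sum) 16777213)
    else PySem.Int.mod (r * ((x :: t).sum + 32 * (5 - ((x :: t).length : Int)))) 16777213
termination_by l _ => l.length
decreasing_by simp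

def chunks : List Int → List (List Int)
  | [] => []
  | x :: t => (x :: t).take 5 :: chunks ((x :: t).drop 5)
termination_by l => l.length
decreasing_by simp

theorem pad_spec : ∀ (k : Nat) (l : List Int), (5 - l.length % 5) % 5 = k →
    hashFourPad l l.length = l ++ List.replicate k 32 := by
  intro k
  induction k with
  | zero =>
    intro l hk
    rw [hashFourPad]
    have : l.length % 5 = 0 := by omega
    simp [this]
  | succ k ih =>
    intro l hk
    rw [hashFourPad]
    have hne : l.length % 5 ≠ 0 := by omega
    have hlen : (l ++ [32]).length = l.length + 1 := by simp
    have := ih (l ++ [32]) (by rw [hlen]; omega)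
    rw [hlen] at this
    simp only [hne, if_pos, ne_eq, not_false_iff, this,
      List.append_assoc, List.singleton_append, List.replicate_succ]

theorem chunks_explicit : ∀ (m : Nat) (p : List Int), p.length = 5 * m →
    chunks p = (List.range m).map (fun k => (p.drop (5 * k)).take 5) := by
  intro m
  induction m with
  | zero =>
    intro p hp
    have : p = [] := List.eq_nil_of_length_eq_zero (by omega)
    subst this
    simp [chunks]
  | succ m ih =>
    intro p hp
    obtain ⟨x, t, rfl⟩ : ∃ x t, p = x :: t := by
      cases p with
      | nil => simp at hp
      | cons x t => exact ⟨x, t, rfl⟩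
    rw [chunks, ih ((x :: t).drop 5) (by simp at hp ⊢; omega),
      List.range_succ_eq_map, List.map_cons, List.map_map]
    refine congrArg₂ _ (by simp) ?_
    apply List.map_congr_left
    intro k _
    simp only [Function.comp, List.drop_drop]
    congr 2
    omega

theorem subList_eq_chunks : ∀ (m : Nat) (p : List Int), p.length = 5 * m →
    (PySem.List.pyRange 0 (p.length : Int) 5).map
      (fun n => PySem.List.slice p (some n) (some (n + 5))) = chunks p := by
  intro m p hp
  rw [PySem.List.pyRange_of_pos 0 (p.length : Int) (by norm_num), chunks_explicit m p hp]
  have hc : (if (0 : Int) < (p.length : Int) then (((p.length : Int) - 0 + 5 - 1) / 5).toNat else 0) = m := by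
    split_ifs with h <;> omega
  rw [hc, List.map_map]
  apply List.map_congr_left
  intro k _
  have h1 : (0 : Int) + 5 * (k : Int) = ((5 * k : Nat) : Int) := by push_cast; ring
  have h2 : ((5 * k : Nat) : Int) + 5 = ((5 * k : Nat) : Int) + ((5 : Nat) : Int) := by norm_num
  simp only [Function.comp, h1, h2, PySem.List.slice_natCast_add]

theorem fold_i_eq_map : ∀ (t full : List (List Int)) (j : Nat) (acc : List Int),
    full.drop j = t →
    t.foldl (fun (st : List Int × Int) _x =>
        (st.1 ++ [(PySem.List.pyGetD full st.2 []).sum], st.2 + 1)) (acc, (j : Int))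
      = (acc ++ t.map List.sum, ((j : Int) + t.length)) := by
  intro t
  induction t with
  | nil => intro full j acc _; simp
  | cons x t ih =>
    intro full j acc h
    have hx : PySem.List.pyGetD full (j : Int) [] = x := by
      rw [PySem.List.pyGetD_natCast]
      have : full[j]? = some x := by
        have : (full.drop j)[0]? = full[j + 0]? := List.getElem?_drop
        rw [h] at this
        simpa using this.symm
      simp [List.getD, this]
    have hd : full.drop (j + 1) = t := by
      have : (full.drop j).drop 1 = full.drop (j + 1) := by
        rw [List.drop_drop]
      rw [← this, h]
      simp
    have hcast : ((j : Int) + 1) = ((j + 1 : Nat) : Int) := by push_cast; ring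
    rw [List.foldl_cons]
    simp only [hx, hcast]
    rw [ih full (j + 1) (acc ++ [x.sum]) hd]
    simp
    ring

theorem G_nil (r : Int) : G [] r = r := by simp [G]

theorem G_ge (l : List Int) (h : 5 ≤ l.length) (r : Int) :
    G l r = G (l.drop 5) (PySem.Int.mod (r * (l.take 5).sum) 16777213) := by
  cases l with
  | nil => simp at h
  | cons x t => rw [G, if_pos h]

theorem G_lt (l : List Int) (h0 : l ≠ []) (h : l.length < 5) (r : Int) :
    G l r = PySem.Int.mod (r * (l.sum + 32 * (5 - (l.length : Int)))) 16777213 := by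
  cases l with
  | nil => simp at h0
  | cons x t => rw [G, if_neg (by omega)]

theorem chunks_fold : ∀ (m : Nat) (p : List Int) (r : Int), p.length = 5 * m →
    ((chunks p).map List.sum).foldl (fun result x => PySem.Int.mod (result * x) 16777213) r
      = G p r := by
  intro m
  induction m with
  | zero =>
    intro p r hp
    have : p = [] := List.eq_nil_of_length_eq_zero (by omega)
    subst this
    simp [chunks, G_nil]
  | succ m ih =>
    intro p r hp
    obtain ⟨x, t, rfl⟩ : ∃ x t, p = x :: t := by
      cases p with
      | nil => simp at hp
      | cons x t => exact ⟨x, t, rfl⟩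
    rw [chunks, List.map_cons, List.foldl_cons,
      ih ((x :: t).drop 5) _ (by simp at hp ⊢; omega),
      G_ge (x :: t) (by omega) r]

theorem G_pad : ∀ (n : Nat) (l : List Int), l.length ≤ n → ∀ (r : Int),
    G (l ++ List.replicate ((5 - l.length % 5) % 5) 32) r = G l r := by
  intro n
  induction n with
  | zero =>
    intro l hl r
    have : l = [] := List.eq_nil_of_length_eq_zero (by omega)
    subst this
    simp
  | succ n ih =>
    intro l hl r
    by_cases h0 : l.length % 5 = 0
    · simp [h0]
    · by_cases h5 : 5 ≤ l.length
      · have hk : (5 - l.length % 5) % 5 = (5 - (l.drop 5).length % 5) % 5 := by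
          simp; omega
        rw [G_ge l h5 r,
          G_ge (l ++ List.replicate ((5 - l.length % 5) % 5) 32) (by simp; omega) r,
          List.take_append_of_le_length (by omega),
          List.drop_append_of_le_length (by omega), hk]
        exact ih (l.drop 5) (by simp; omega) _
      · have hne : l ≠ [] := by
          intro h; rw [h] at h0; simp at h0
        have hlen : l.length < 5 := by omega
        have hk : (5 - l.length % 5) % 5 = 5 - l.length := by omega
        rw [hk]
        have hplen : (l ++ List.replicate (5 - l.length) 32).length = 5 := by
          simp; omega
        rw [G_ge _ (by omega) r, List.take_of_length_le (by omega),
          List.drop_eq_nil_of_le (by omega), G_nil,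
          G_lt l hne hlen r]
        congr 1
        rw [List.sum_append, List.sum_replicate, nsmul_eq_mul]
        have : ((5 - l.length : Nat) : Int) = 5 - (l.length : Int) := by omega
        rw [this]
        ring

theorem balt_eq_G : ∀ (n : Nat) (l : List Int), l.length ≤ n → ∀ (r : Int),
    (let s := l.foldl bStep (r, 0, 0);
     if s.2.2 ≠ 0 then PySem.Int.mod (s.1 * (s.2.1 + 32 * (5 - s.2.2))) 16777213 else s.1) = G l r := by
  intro n
  induction n with
  | zero =>
    intro l hl r
    have : l = [] := List.eq_nil_of_length_eq_zero (by omega)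
    subst this
    simp [G_nil]
  | succ n ih =>
    intro l hl r
    by_cases h5 : 5 ≤ l.length
    · obtain ⟨a, b, c, d, e, t, rfl⟩ :
          ∃ a b c d e t, l = a :: b :: c :: d :: e :: t := by
        match l, h5 with
        | a :: b :: c :: d :: e :: t, _ => exact ⟨a, b, c, d, e, t, rfl⟩
      have peel : (a :: b :: c :: d :: e :: t).foldl bStep (r, 0, 0)
          = t.foldl bStep (PySem.Int.mod (r * (a + b + c + d + e)) 16777213, 0, 0) := by
        simp [bStep]
      dsimp only
      rw [peel, G_ge _ h5 r]
      have := ih t (by simp at hl ⊢; omega) (PySem.Int.mod (r * (a + b + c + d + e)) 16777213)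
      dsimp only at this
      rw [this]
      have hdrop : (a :: b :: c :: d :: e :: t).drop 5 = t := rfl
      have hsum : ((a :: b :: c :: d :: e :: t).take 5).sum = a + b + c + d + e := by
        simp only [List.take_succ_cons, List.take_zero, List.sum_cons, List.sum_nil]
        ring
      rw [hdrop, hsum]
    · cases l with
      | nil => simp [G_nil]
      | cons x t =>
        have hshort : (x :: t).foldl bStep (r, 0, 0)
            = (r, (x :: t).sum, ((x :: t).length : Int)) := by
          match t, h5 with
          | [], _ => simp [bStep]
          | [b], _ => simp [bStep]
          | [b, c], _ => simp [bStep, add_assoc]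
          | [b, c, d], _ => simp [bStep, add_assoc]
          | b :: c :: d :: e :: t', h5 => simp at h5
        dsimp only
        rw [hshort, if_pos (show (((x :: t).length : Int)) ≠ 0 by simp; omega),
          G_lt (x :: t) (by simp) (by omega) r]

-- ===== VERDICT (by name: the statement is the Claim_ definition above) =====
theorem hashFour_spec : Claim_equal_hashFour := by
  intro l _
  unfold Spec_hashFour
  have halt : hashFour_alt l = G l 1 := balt_eq_G l.length l le_rfl 1
  rw [halt]
  unfold hashFour
  set k := (5 - l.length % 5) % 5 with hk
  rw [pad_spec k l rfl]
  set p := l ++ List.replicate k 32 with hp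
  have hplen : p.length = l.length + k := by simp [hp]
  have hmod : p.length % 5 = 0 := by omega
  rw [if_pos hmod]
  obtain ⟨m, hm⟩ : ∃ m, p.length = 5 * m := ⟨p.length / 5, by omega⟩
  dsimp only
  rw [subList_eq_chunks m p hm]
  have hfold := fold_i_eq_map (chunks p) (chunks p) 0 [] (by simp)
  norm_num at hfold
  rw [hfold]
  dsimp only
  rw [chunks_fold m p 1 hm]
  rw [hp, hk]
  exact G_pad l.length l le_rfl 1
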